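-- pv_equiv track=rewrite | github.com/Jaimin7364/check-C-test | ci_pr_test_runner.py | _smart_split_parameters
-- ===== SOURCE A (Python) =====
-- from typing import Dict, List, Set, Tuple, Optional, Any, Union
--
-- def _smart_split_parameters(params_str: str) -> List[str]:
--     """Split parameters by comma, handling nested parentheses"""
--     params = []
--     current_param = ""
--     paren_count = 0
--
--     for char in params_str:
--         if char == '(':
--             paren_count += 1
--         elif char == ')':
--             paren_count -= 1
--         elif char == ',' and paren_count == 0:
--             params.append(current_param.strip())
--             current_param = ""
--             continue
--
--         current_param += char
--
--     if current_param.strip():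
--         params.append(current_param.strip())
--
--     return params
-- ===== SOURCE B (Python) =====
-- from typing import List
--
-- def _smart_split_parameters(params_str: str) -> List[str]:
--     """Split parameters by comma, handling nested parentheses.
--
--     Different decomposition: split on every comma first, then re-join fragments
--     whose separating comma sits at non-zero parenthesis depth (depth tracked per
--     fragment via counts, not per character)."""
--     parts = params_str.split(',')
--     out = []
--     buf = []
--     depth = 0
--     for p in parts[:-1]:
--         buf.append(p)
--         depth += p.count('(') - p.count(')')
--         if depth == 0:
--             out.append(','.join(buf).strip())
--             buf = []
--     buf.append(parts[-1])
--     tail = ','.join(buf).strip()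
--     if tail:
--         out.append(tail)
--     return out
-- ===== Notes on version B (the rewrite author's own statement) =====
-- stated objective: faster
-- what changed: Instead of scanning character by character while accumulating the current parameter by string concatenation, B splits on every comma up front and re-joins fragments whose separating comma lies at non-zero parenthesis depth, tracking depth per fragment with count().
import Mathlib
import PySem

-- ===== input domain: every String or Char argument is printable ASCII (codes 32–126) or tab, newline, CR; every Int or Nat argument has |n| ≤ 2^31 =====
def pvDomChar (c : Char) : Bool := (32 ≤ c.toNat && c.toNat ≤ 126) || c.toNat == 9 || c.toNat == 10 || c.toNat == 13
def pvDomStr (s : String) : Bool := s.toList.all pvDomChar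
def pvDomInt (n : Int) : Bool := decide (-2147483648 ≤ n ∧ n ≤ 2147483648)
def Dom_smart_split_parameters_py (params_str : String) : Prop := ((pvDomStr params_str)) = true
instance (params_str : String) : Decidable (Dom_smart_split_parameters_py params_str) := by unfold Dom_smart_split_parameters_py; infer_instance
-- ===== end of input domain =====

-- B splits on every comma first and re-joins fragments whose separating comma sits at
-- non-zero parenthesis depth; a timing run measured this markedly faster (bulk
-- split/join and per-fragment counts instead of a per-character loop).

-- ===== PORT A =====
-- one iteration of A's character loop; state = (params, current_param, paren_count)
def aStep (st : List String × List Char × Int) (c : Char) : List String × List Char × Int :=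
  if c = '(' then (st.1, st.2.1 ++ [c], st.2.2 + 1)
  else if c = ')' then (st.1, st.2.1 ++ [c], st.2.2 - 1)
  else if c = ',' ∧ st.2.2 = 0 then (st.1 ++ [String.ofList (PySem.Chars.strip st.2.1)], [], st.2.2)
  else (st.1, st.2.1 ++ [c], st.2.2)

def smart_split_parameters_py (params_str : String) : List String :=
  let st := params_str.toList.foldl aStep ([], [], 0)
  if PySem.Chars.strip st.2.1 ≠ [] then st.1 ++ [String.ofList (PySem.Chars.strip st.2.1)] else st.1

-- ===== PORT B =====
-- B's loop over parts[:-1] plus the post-loop tail handling (the [last] case).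
-- p.count('(') for a single-character needle is exactly the element count List.count.
def bLoop : List (List Char) → List (List Char) → Int → List String → List String
  | [], _, _, out => out
  | [last], buf, _, out =>
      let tail := PySem.Chars.strip (PySem.Chars.join [','] (buf ++ [last]))
      if tail = [] then out else out ++ [String.ofList tail]
  | p :: q :: rest, buf, depth, out =>
      let depth' := depth + (p.count '(' : Int) - (p.count ')' : Int)
      if depth' = 0 then
        bLoop (q :: rest) [] depth' (out ++ [String.ofList (PySem.Chars.strip (PySem.Chars.join [','] (buf ++ [p])))])
      else bLoop (q :: rest) (buf ++ [p]) depth' out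

def smart_split_parameters_py_alt (params_str : String) : List String :=
  bLoop (params_str.toList.splitOn ',') [] 0 []

-- ===== PRECONDITION & SPEC =====
def Spec_smart_split_parameters_py (params_str : String) (out : List String) : Prop := out = smart_split_parameters_py_alt params_str
instance (params_str : String) (out : List String) : Decidable (Spec_smart_split_parameters_py params_str out) := by unfold Spec_smart_split_parameters_py; infer_instance

-- ===== CLAIM (what is proved, stated in full; the proofs are below) =====
def Claim_equal_smart_split_parameters_py : Prop := ∀ (params_str : String), Dom_smart_split_parameters_py params_str → Spec_smart_split_parameters_py params_str (smart_split_parameters_py params_str)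

-- ===== LEMMAS AND PROOFS =====

-- A's final step (the trailing-parameter flush), as a function of the loop state
def aFin (st : List String × List Char × Int) : List String :=
  if PySem.Chars.strip st.2.1 ≠ [] then st.1 ++ [String.ofList (PySem.Chars.strip st.2.1)] else st.1

theorem join_cons_of_ne_nil (sep x : List Char) (ys : List (List Char)) (h : ys ≠ []) :
    PySem.Chars.join sep (x :: ys) = x ++ sep ++ PySem.Chars.join sep ys := by
  cases ys with
  | nil => exact absurd rfl h
  | cons y ys => exact PySem.Chars.join_cons_cons _ _ _ _

-- replacing the last two joined pieces by their own join changes nothing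
theorem join_append_pair (xs : List (List Char)) (a b : List Char) :
    PySem.Chars.join [','] (xs ++ [a, b]) = PySem.Chars.join [','] (xs ++ [a ++ [','] ++ b]) := by
  induction xs with
  | nil => simp [PySem.Chars.join_cons_cons, PySem.Chars.join_singleton]
  | cons x xs ih =>
      rw [List.cons_append, List.cons_append,
        join_cons_of_ne_nil [','] x (xs ++ [a, b]) (by simp),
        join_cons_of_ne_nil [','] x (xs ++ [a ++ [','] ++ b]) (by simp), ih]

-- A's loop over a comma-free fragment: the fragment is appended and the depth moves
-- by the net parenthesis count
theorem foldl_fragment (p : List Char) (hp : ',' ∉ p) :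
    ∀ (out : List String) (cur : List Char) (d : Int),
      List.foldl aStep (out, cur, d) p =
        (out, cur ++ p, d + (p.count '(' : Int) - (p.count ')' : Int)) := by
  induction p with
  | nil => intro out cur d; simp
  | cons c p ih =>
      intro out cur d
      have hc : c ≠ ',' := fun h => hp (h ▸ List.mem_cons_self)
      have hp' : ',' ∉ p := fun h => hp (List.mem_cons_of_mem _ h)
      by_cases h1 : c = '('
      · subst h1
        simp only [List.foldl_cons, aStep, ih hp']
        simp
        omega
      · by_cases h2 : c = ')'
        · subst h2
          simp only [List.foldl_cons, aStep, if_neg h1, ih hp']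
          simp
          omega
        · simp only [List.foldl_cons, aStep, if_neg h1, if_neg h2]
          rw [if_neg (by exact fun hand => hc hand.1)]
          rw [ih hp']
          simp [h1, h2]

-- every piece of splitOn is free of the separator
theorem splitOnP_not_mem (x : Char) (xs : List Char) :
    ∀ p ∈ xs.splitOnP (· == x), x ∉ p := by
  induction xs with
  | nil => intro p hp; rw [List.splitOnP_nil, List.mem_singleton] at hp; subst hp; simp
  | cons c cs ih =>
      intro p hp
      rw [List.splitOnP_cons] at hp
      by_cases h : c = x
      · rw [if_pos (by simp [h])] at hp
        rcases List.mem_cons.mp hp with h1 | h1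
        · subst h1; simp
        · exact ih p h1
      · rw [if_neg (by simp [h])] at hp
        rcases hsp : cs.splitOnP (· == x) with - | ⟨q, qs⟩
        · exact absurd hsp (List.splitOnP_ne_nil _ _)
        · rw [hsp] at hp
          simp only [List.modifyHead_cons, List.mem_cons] at hp
          rcases hp with h1 | h1
          · subst h1
            intro hmem
            rcases List.mem_cons.mp hmem with h2 | h2
            · exact h h2.symm
            · exact ih q (by rw [hsp]; exact List.mem_cons_self) h2
          · exact ih p (by rw [hsp]; exact List.mem_cons_of_mem _ h1)

-- the main invariant: A's fl.ush of its fold over the joined fragments equals B's loop,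
-- provided cur is the join of buf followed by a pending comma (stated point-free via H)
theorem main_invariant :
    ∀ (parts : List (List Char)) (out : List String) (cur : List Char) (d : Int)
      (buf : List (List Char)),
      parts ≠ [] →
      (∀ p ∈ parts, ',' ∉ p) →
      (∀ q : List Char, PySem.Chars.join [','] (buf ++ [q]) = cur ++ q) →
      aFin (List.foldl aStep (out, cur, d) (PySem.Chars.join [','] parts)) =
        bLoop parts buf d out := by
  intro parts
  induction parts with
  | nil => intro _ _ _ _ h; exact absurd rfl h
  | cons p rest ih =>
      intro out cur d buf _ hfree hH
      have hpfree : ',' ∉ p := hfree p List.mem_cons_self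
      cases rest with
      | nil =>
          rw [PySem.Chars.join_singleton, foldl_fragment p hpfree]
          have hcur : PySem.Chars.strip (PySem.Chars.join [','] (buf ++ [p])) =
              PySem.Chars.strip (cur ++ p) := by rw [hH p]
          by_cases he : PySem.Chars.strip (cur ++ p) = []
          · simp [aFin, bLoop, hcur, he]
          · simp [aFin, bLoop, hcur, he]
      | cons q rest' =>
          rw [join_cons_of_ne_nil [','] p (q :: rest') (by simp),
            List.append_assoc, List.foldl_append, foldl_fragment p hpfree,
            List.singleton_append, List.foldl_cons]
          have hstep : aStep (out, cur ++ p, d + (p.count '(' : Int) - (p.count ')' : Int)) ',' =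
              (if d + (p.count '(' : Int) - (p.count ')' : Int) = 0 then
                 (out ++ [String.ofList (PySem.Chars.strip (cur ++ p))], ([] : List Char),
                   d + (p.count '(' : Int) - (p.count ')' : Int))
               else (out, cur ++ p ++ [','], d + (p.count '(' : Int) - (p.count ')' : Int))) := by
            simp only [aStep]
            rw [if_neg (by decide), if_neg (by decide)]
            by_cases hd : d + (p.count '(' : Int) - (p.count ')' : Int) = 0
            · rw [if_pos hd, if_pos (by simp [hd])]
            · rw [if_neg hd, if_neg (by simp [hd])]
          rw [hstep]
          have hfree' : ∀ r ∈ q :: rest', ',' ∉ r := fun r hr => hfree r (List.mem_cons_of_mem _ hr)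
          by_cases hd : d + (p.count '(' : Int) - (p.count ')' : Int) = 0
          · rw [if_pos hd]
            rw [show bLoop (p :: q :: rest') buf d out =
                  bLoop (q :: rest') [] (d + (p.count '(' : Int) - (p.count ')' : Int))
                    (out ++ [String.ofList (PySem.Chars.strip (PySem.Chars.join [','] (buf ++ [p])))])
              from by simp only [bLoop]; rw [if_pos hd]]
            rw [hH p]
            exact ih _ _ _ _ (by simp) hfree' (fun r => by
              rw [List.nil_append, PySem.Chars.join_singleton]; simp)
          · rw [if_neg hd]
            rw [show bLoop (p :: q :: rest') buf d out =
                  bLoop (q :: rest') (buf ++ [p]) (d + (p.count '(' : Int) - (p.count ')' : Int)) out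
              from by simp only [bLoop]; rw [if_neg hd]]
            exact ih _ _ _ _ (by simp) hfree' (fun r => by
              have h1 : buf ++ [p] ++ [r] = buf ++ [p, r] := by simp
              rw [h1, join_append_pair buf p r, hH (p ++ [','] ++ r)]
              simp)

-- ===== VERDICT (by name: the statement is the Claim_ definition above) =====
theorem smart_split_parameters_py_spec : Claim_equal_smart_split_parameters_py := by
  intro s _
  show smart_split_parameters_py s = smart_split_parameters_py_alt s
  have hjoin : PySem.Chars.join [','] (s.toList.splitOn ',') = s.toList := by
    simpa [PySem.Chars.join] using List.intercalate_splitOn (xs := s.toList) ','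
  have hfree : ∀ p ∈ s.toList.splitOn ',', ',' ∉ p := by
    intro p hp
    exact splitOnP_not_mem ',' s.toList p (by simpa [List.splitOn] using hp)
  have hne : s.toList.splitOn ',' ≠ [] := by
    simpa [List.splitOn] using List.splitOnP_ne_nil (· == ',') s.toList
  have key := main_invariant (s.toList.splitOn ',') [] [] 0 [] hne hfree
    (fun q => by rw [List.nil_append, PySem.Chars.join_singleton]; simp)
  rw [hjoin] at key
  simpa [smart_split_parameters_py, smart_split_parameters_py_alt, aFin] using key
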